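-- pv_equiv track=rewrite | github.com/mideind/GreynirSeq | src/greynirseq/serve/serve_all.py | append_punctuation_previous
-- ===== SOURCE A (Python) =====
-- def append_punctuation_previous(sentence):
--     tokens = sentence.split()
--     clean_tokens = []
--     for token in tokens:
--         if token in [",", ".", ":", ";"]:
--             if clean_tokens:
--                 clean_tokens[-1] += token
--         else:
--             clean_tokens.append(token)
--     return " ".join(clean_tokens)
-- ===== SOURCE B (Python) =====
-- def append_punctuation_previous(sentence):
--     tokens = sentence.split()
--     n = len(tokens)
--     groups = []
--     i = 0
--     while i < n:
--         tok = tokens[i]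
--         i += 1
--         if tok in (",", ".", ":", ";"):
--             continue  # orphan punctuation (nothing before it to attach to) is dropped
--         while i < n and tokens[i] in (",", ".", ":", ";"):
--             tok += tokens[i]
--             i += 1
--         groups.append(tok)
--     return " ".join(groups)
-- ===== Notes on version B (the rewrite author's own statement) =====
-- stated objective: alternative
-- what changed: Replaces A's flat accumulator loop that patches clean_tokens[-1] with an index-driven group scan: each non-punctuation token starts a group, an inner while-loop absorbs the following standalone punctuation tokens, and groups are joined at the end.
import Mathlib
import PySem

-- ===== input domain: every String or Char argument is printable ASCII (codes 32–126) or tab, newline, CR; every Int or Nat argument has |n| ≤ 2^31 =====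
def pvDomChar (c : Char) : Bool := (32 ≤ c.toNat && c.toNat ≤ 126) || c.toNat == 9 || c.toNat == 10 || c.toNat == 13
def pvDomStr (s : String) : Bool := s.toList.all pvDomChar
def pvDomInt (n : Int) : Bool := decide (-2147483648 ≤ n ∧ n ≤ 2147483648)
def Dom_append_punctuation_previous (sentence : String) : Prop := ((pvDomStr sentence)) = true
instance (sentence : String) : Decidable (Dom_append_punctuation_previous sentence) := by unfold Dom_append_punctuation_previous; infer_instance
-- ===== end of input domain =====

-- B replaces A's flat accumulator loop (patching clean_tokens[-1]) with an index-driven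
-- group scan whose inner while-loop absorbs trailing standalone punctuation; same cost.

-- ===== PORT A =====

def pvIsPunct (t : String) : Bool := t == "," || t == "." || t == ":" || t == ";"

-- clean_tokens[-1] += token
def pvAppendLast : List String → String → List String
  | [], _ => []
  | [x], t => [x ++ t]
  | x :: y :: xs, t => x :: pvAppendLast (y :: xs) t

-- the body of A's for-loop, folded over the tokens
def pvStepA (acc : List String) (token : String) : List String :=
  if pvIsPunct token then
    if acc ≠ [] then pvAppendLast acc token else acc
  else acc ++ [token]

def append_punctuation_previous (sentence : String) : String :=
  PySem.Str.join " " ((PySem.Str.split₀ sentence).foldl pvStepA [])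

-- ===== PORT B =====

-- the inner while-loop: absorb following punctuation tokens into the group
def pvEat : String → List String → String × List String
  | g, [] => (g, [])
  | g, t :: ts => if pvIsPunct t then pvEat (g ++ t) ts else (g, t :: ts)

theorem pvEat_len (g : String) (ts : List String) : (pvEat g ts).2.length ≤ ts.length := by
  induction ts generalizing g with
  | nil => simp [pvEat]
  | cons t ts ih =>
    simp only [pvEat]
    split
    · exact le_trans (ih _) (Nat.le_succ _)
    · simp

-- the outer while-loop over the token index, as recursion on the remaining tokens
def pvGroups : List String → List String
  | [] => []
  | t :: ts =>
    if pvIsPunct t then pvGroups ts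
    else (pvEat t ts).1 :: pvGroups (pvEat t ts).2
termination_by ts => ts.length
decreasing_by
  · simp
  · exact Nat.lt_succ_of_le (pvEat_len t ts)

def append_punctuation_previous_alt (sentence : String) : String :=
  PySem.Str.join " " (pvGroups (PySem.Str.split₀ sentence))

-- ===== PRECONDITION & SPEC =====
def Spec_append_punctuation_previous (sentence : String) (out : String) : Prop := out = append_punctuation_previous_alt sentence
instance (sentence : String) (out : String) : Decidable (Spec_append_punctuation_previous sentence out) := by unfold Spec_append_punctuation_previous; infer_instance

-- ===== CLAIM (what is proved, stated in full; the proofs are below) =====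
def Claim_equal_append_punctuation_previous : Prop := ∀ (sentence : String), Dom_append_punctuation_previous sentence → Spec_append_punctuation_previous sentence (append_punctuation_previous sentence)

-- ===== LEMMAS AND PROOFS =====

theorem pvAppendLast_append (init : List String) (l t : String) :
    pvAppendLast (init ++ [l]) t = init ++ [l ++ t] := by
  induction init with
  | nil => rfl
  | cons x xs ih =>
    cases xs with
    | nil => rfl
    | cons y ys => simpa [pvAppendLast] using ih

-- A's fold from a nonempty accumulator equals B's "finish the open group, then scan on"
theorem foldA_nonempty (ts : List String) (init : List String) (l : String) :
    (ts.foldl pvStepA (init ++ [l])) =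
      init ++ (pvEat l ts).1 :: pvGroups (pvEat l ts).2 := by
  induction ts generalizing init l with
  | nil => simp [pvEat, pvGroups]
  | cons t ts ih =>
    by_cases hp : pvIsPunct t
    · have : pvStepA (init ++ [l]) t = init ++ [l ++ t] := by
        simp [pvStepA, hp, pvAppendLast_append]
      simp only [List.foldl_cons, this, pvEat, hp, if_pos]
      exact ih init (l ++ t)
    · have : pvStepA (init ++ [l]) t = (init ++ [l]) ++ [t] := by
        simp [pvStepA, hp]
      simp only [List.foldl_cons, this, pvEat, hp, if_neg, Bool.false_eq_true,
        not_false_iff]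
      rw [ih (init ++ [l]) t]
      simp [pvGroups, hp]

theorem foldA_empty (ts : List String) : ts.foldl pvStepA [] = pvGroups ts := by
  induction ts with
  | nil => simp [pvGroups]
  | cons t ts ih =>
    by_cases hp : pvIsPunct t
    · simp only [List.foldl_cons, pvStepA, hp, if_pos, ne_eq, not_true_eq_false,
        if_neg, not_false_iff]
      simpa [pvGroups, hp] using ih
    · have : pvStepA [] t = [] ++ [t] := by simp [pvStepA, hp]
      rw [List.foldl_cons, this, foldA_nonempty ts [] t]
      simp [pvGroups, hp]

-- ===== VERDICT (by name: the statement is the Claim_ definition above) =====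
theorem append_punctuation_previous_spec : Claim_equal_append_punctuation_previous := by
  intro sentence _
  unfold Spec_append_punctuation_previous append_punctuation_previous append_punctuation_previous_alt
  rw [foldA_empty]
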